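-- pv_equiv track=rewrite | github.com/HornPenguin-Qhack2024-team/OpenHackathon | module/AdiaFrame/adiaframe/utils.py | pstr_from_xz
-- ===== SOURCE A (Python) =====
-- int_pchar = ["I", "Z", "X", "Y"]
--
-- def pstr_from_xz(x_int, z_int):
--     z_modi = insert_zeros_in_gaps(z_int)
--     x_modi = insert_zeros_in_gaps(x_int)
--     x_modi <<= 1
--
--     p_int = x_modi + z_modi
--     # In binary representation: (00)(10)(10)(11) form
--     # 00:I, 10: X 01: Z, 11: Y
--
--     # Get length of str
--     len_p = 0
--     tem = p_int
--     while tem: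
--         len_p +=1
--         tem >>=1
--     len_p += len_p&1
--     pstr = len_p*['']
--     i = 1
--     while p_int >0:
--         p = p_int & 3
--         p_int >>= 2
--         pstr[-i] = int_pchar[p]
--         i+=1
--     return "".join(pstr)
--
-- def insert_zeros_in_gaps(n):
--     result = 0
--     bit_position = 0
--
--     while n > 0:
--         # Isolate the rightmost bit
--         rightmost_bit = n & 1
--         # Shift the bit to its new position
--         result |= rightmost_bit << (bit_position << 1)
--         # Move to the next bit
--         n >>= 1
--         bit_position += 1
--
--     return result
-- ===== SOURCE B (Python) =====
-- int_pchar = ["I", "Z", "X", "Y"]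
--
-- def pstr_from_xz(x_int, z_int):
--     # Treat negative masks as empty (no bits set), like the originals' while-guards.
--     x = max(x_int, 0)
--     z = max(z_int, 0)
--     n = max(x.bit_length(), z.bit_length())
--     return "".join(int_pchar[((x >> i) & 1) * 2 + ((z >> i) & 1)]
--                    for i in range(n - 1, -1, -1))
-- ===== Notes on version B (the rewrite author's own statement) =====
-- stated objective: simpler
-- what changed: B replaces A's bit-interleaving pipeline (insert_zeros_in_gaps on each mask, shift, add, a separate bit-length loop, and a backwards fill of a preallocated list) by a single direct pass over bit positions from high to low, reading one x-bit and one z-bit per position and joining the characters.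
import Mathlib
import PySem

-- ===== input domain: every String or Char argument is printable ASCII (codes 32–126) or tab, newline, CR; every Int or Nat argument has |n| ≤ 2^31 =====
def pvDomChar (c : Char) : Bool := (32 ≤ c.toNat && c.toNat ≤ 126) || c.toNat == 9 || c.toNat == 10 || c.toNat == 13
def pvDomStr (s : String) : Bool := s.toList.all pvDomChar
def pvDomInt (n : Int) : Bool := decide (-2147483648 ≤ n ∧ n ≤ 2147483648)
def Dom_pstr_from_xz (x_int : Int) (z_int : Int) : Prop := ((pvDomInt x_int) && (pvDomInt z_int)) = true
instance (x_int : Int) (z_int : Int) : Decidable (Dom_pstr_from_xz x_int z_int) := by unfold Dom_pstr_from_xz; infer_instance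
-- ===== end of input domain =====

-- B replaces A's interleave/length/backfill pipeline by one direct high-to-low pass over bit
-- positions (objective: simpler); the return value is proved equal on all of Dom.

-- ===== PORT A =====
def int_pchar : List String := ["I", "Z", "X", "Y"]

-- Python's `<<`/`>>`/`|`/`&` on int are Lean's `<<<`/`>>>`/`PySem.Int.bor`/`PySem.Int.band`;
-- bit_position starts at 0 and only increments, so it is carried as the Nat shift amount.
def insertZerosLoop (n : Int) (result : Int) (bit_position : Nat) : Int :=
  if n > 0 then
    insertZerosLoop (n >>> (1:Nat))
      (PySem.Int.bor result ((PySem.Int.band n 1) <<< (bit_position <<< 1)))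
      (bit_position + 1)
  else result
termination_by n.toNat
decreasing_by
  rename_i h
  have : n >>> (1:Nat) = n / 2 := by rw [Int.shiftRight_eq_div_pow]; norm_num
  omega

def insert_zeros_in_gaps (n : Int) : Int := insertZerosLoop n 0 0

-- Python's `while tem:`; tem = p_int here is always ≥ 0, so truthiness is `tem > 0`.
def lenLoop (tem : Int) (len_p : Int) : Int :=
  if tem > 0 then lenLoop (tem >>> (1:Nat)) (len_p + 1) else len_p
termination_by tem.toNat
decreasing_by
  rename_i h
  have : tem >>> (1:Nat) = tem / 2 := by rw [Int.shiftRight_eq_div_pow]; norm_num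
  omega

-- `pstr[-i] = int_pchar[p]`: negative-index assignment at position len - i (here always
-- 1 ≤ i ≤ len, and 0 ≤ p ≤ 3 so the list index never raises; `.getD ""` is unreachable).
def fillLoop (p_int : Int) (i : Nat) (pstr : List String) : List String :=
  if p_int > 0 then
    fillLoop (p_int >>> (2:Nat)) (i + 1)
      (pstr.set (pstr.length - i)
        ((PySem.List.pyGet? int_pchar (PySem.Int.band p_int 3)).getD ""))
  else pstr
termination_by p_int.toNat
decreasing_by
  rename_i h
  have : p_int >>> (2:Nat) = p_int / 4 := by rw [Int.shiftRight_eq_div_pow]; norm_num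
  omega

def pstr_from_xz (x_int : Int) (z_int : Int) : String :=
  let z_modi := insert_zeros_in_gaps z_int
  let x_modi := insert_zeros_in_gaps x_int
  let x_modi := x_modi <<< (1:Nat)
  let p_int := x_modi + z_modi
  let len_p := lenLoop p_int 0
  let len_p := len_p + PySem.Int.band len_p 1
  let pstr := PySem.List.pyRepeat [""] len_p
  PySem.Str.join "" (fillLoop p_int 1 pstr)

-- ===== PORT B =====
-- `i` drawn from range(n-1, -1, -1) is always ≥ 0, so `x >> i` is the Nat-amount shift `>>> i.toNat`.
def pstr_from_xz_alt (x_int : Int) (z_int : Int) : String :=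
  let x := max x_int 0
  let z := max z_int 0
  let n : Nat := max (PySem.Int.bitLength x) (PySem.Int.bitLength z)
  PySem.Str.join ""
    ((PySem.List.pyRange ((n : Int) - 1) (-1) (-1)).map (fun i =>
      (PySem.List.pyGet? int_pchar
        (PySem.Int.band (x >>> i.toNat) 1 * 2 + PySem.Int.band (z >>> i.toNat) 1)).getD ""))

-- ===== PRECONDITION & SPEC =====
def Spec_pstr_from_xz (x_int : Int) (z_int : Int) (out : String) : Prop := out = pstr_from_xz_alt x_int z_int
instance (x_int : Int) (z_int : Int) (out : String) : Decidable (Spec_pstr_from_xz x_int z_int out) := by unfold Spec_pstr_from_xz; infer_instance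

-- ===== CLAIM (what is proved, stated in full; the proofs are below) =====
def Claim_equal_pstr_from_xz : Prop := ∀ (x_int : Int) (z_int : Int), Dom_pstr_from_xz x_int z_int → Spec_pstr_from_xz x_int z_int (pstr_from_xz x_int z_int)

-- ===== LEMMAS AND PROOFS =====

-- the Pauli character of a 2-bit code (the list lookup both ports perform)
def pch (r : Nat) : String := (PySem.List.pyGet? int_pchar (r : Int)).getD ""

-- reference value: one character per bit position, low bit last
def bitsStr (x z : Nat) : List String :=
  if x = 0 ∧ z = 0 then [] else
    bitsStr (x / 2) (z / 2) ++ [pch (2 * (x % 2) + z % 2)]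
termination_by x + z
decreasing_by omega

-- the value computed by insert_zeros_in_gaps
def ilv (m : Nat) : Nat :=
  if m = 0 then 0 else m % 2 + 4 * ilv (m / 2)
termination_by m

-- the pair decomposition of the combined integer, high pair first
def pairsStr (m : Nat) : List String :=
  if m = 0 then [] else pairsStr (m / 4) ++ [pch (m % 4)]
termination_by m
decreasing_by omega

theorem ilv_rec (m : Nat) : ilv m = m % 2 + 4 * ilv (m / 2) := by
  rw [ilv]
  by_cases h : m = 0
  · subst h; rw [ilv]; simp
  · simp [h]

theorem ilv_eq_zero_iff (m : Nat) : ilv m = 0 ↔ m = 0 := by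
  induction m using Nat.strong_induction_on with
  | _ m ih =>
    constructor
    · intro h
      rw [ilv_rec m] at h
      by_contra hm
      have h2 : m % 2 = 0 ∧ ilv (m / 2) = 0 := by omega
      have := (ih (m / 2) (by omega)).mp h2.2
      omega
    · intro h; subst h; rw [ilv]; simp

theorem testBit_mul_pow_add_lo {c k r j : Nat} (hj : j < k) :
    (c * 2 ^ k + r).testBit j = r.testBit j := by
  rw [Nat.testBit_eq_decide_div_mod_eq, Nat.testBit_eq_decide_div_mod_eq]

  have hk : 2 ^ k = 2 ^ j * 2 * 2 ^ (k - j - 1) := by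
    rw [mul_assoc, ← pow_succ']
    rw [← pow_add]
    congr 1
    omega
  have h2 : (c * 2 ^ k + r) / 2 ^ j = 2 * (c * 2 ^ (k - j - 1)) + r / 2 ^ j := by
    rw [hk]
    have heq : c * (2 ^ j * 2 * 2 ^ (k - j - 1)) + r = 2 ^ j * (2 * (c * 2 ^ (k - j - 1))) + r := by
      ring
    rw [heq, Nat.mul_add_div (Nat.two_pow_pos j)]
  rw [h2]
  simp only [decide_eq_decide]
  omega

theorem testBit_mul_pow_add_hi {c k r j : Nat} (hr : r < 2 ^ k) (hj : k ≤ j) :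
    (c * 2 ^ k + r).testBit j = c.testBit (j - k) := by
  rw [Nat.testBit_eq_decide_div_mod_eq, Nat.testBit_eq_decide_div_mod_eq]
  have h1 : (c * 2 ^ k + r) / 2 ^ k = c := by
    rw [Nat.add_comm, Nat.add_mul_div_right _ _ (Nat.two_pow_pos k),
      Nat.div_eq_of_lt hr, Nat.zero_add]
  have h2 : (c * 2 ^ k + r) / 2 ^ j = c / 2 ^ (j - k) := by
    have : (2:Nat) ^ j = 2 ^ k * 2 ^ (j - k) := by rw [← pow_add]; congr 1; omega
    rw [this, ← Nat.div_div_eq_div_mul, h1]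
  rw [h2]

theorem or_shift_add {r c k : Nat} (hr : r < 2 ^ k) :
    r ||| (c <<< k) = c * 2 ^ k + r := by
  apply Nat.eq_of_testBit_eq
  intro j
  rw [Nat.testBit_lor, Nat.testBit_shiftLeft]
  by_cases hj : j < k
  · rw [testBit_mul_pow_add_lo hj]
    simp [Nat.not_le.mpr hj]
  · have hj' : k ≤ j := by omega
    rw [testBit_mul_pow_add_hi hr hj']
    have hrj : r.testBit j = false :=
      Nat.testBit_lt_two_pow (lt_of_lt_of_le hr (Nat.pow_le_pow_right (by norm_num) hj'))
    simp [hrj, hj']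

theorem insertZerosLoop_eq (m : Nat) : ∀ (r bp : Nat), r < 4 ^ bp →
    insertZerosLoop (m : Int) (r : Int) bp = ((r + 4 ^ bp * ilv m : Nat) : Int) := by
  induction m using Nat.strong_induction_on with
  | _ m ih =>
    intro r bp hr
    rw [insertZerosLoop]
    by_cases hm : m = 0
    · subst hm
      rw [if_neg (by norm_num)]
      rw [ilv]
      simp
    · have hmpos : ((m:Int) > 0) := by exact_mod_cast Nat.pos_of_ne_zero hm
      rw [if_pos hmpos]
      have e1 : (m:Int) >>> (1:Nat) = ((m >>> 1 : Nat) : Int) := by simp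
      have e2 : PySem.Int.band (m:Int) 1 = ((m &&& 1 : Nat) : Int) := by
        exact_mod_cast PySem.Int.band_natCast m 1
      have e3 : ((m &&& 1 : Nat) : Int) <<< (bp <<< 1) = ((((m &&& 1) <<< (bp <<< 1)) : Nat) : Int) := by
        simp
      have e4 : PySem.Int.bor (r : Int) ((((m &&& 1) <<< (bp <<< 1)) : Nat) : Int)
          = (((r ||| ((m &&& 1) <<< (bp <<< 1))) : Nat) : Int) := PySem.Int.bor_natCast _ _
      rw [e2, e1, e3, e4]
      have hpow : (2:Nat) ^ (2 * bp) = 4 ^ bp := by rw [pow_mul]; norm_num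
      have hbp : bp <<< 1 = 2 * bp := by rw [Nat.shiftLeft_eq]; ring
      have hor : r ||| ((m &&& 1) <<< (bp <<< 1)) = r + (m % 2) * 4 ^ bp := by
        rw [hbp, Nat.and_one_is_mod]
        rw [or_shift_add (by rw [hpow]; exact hr)]
        rw [hpow]
        ring
      rw [hor]
      have hhalf : m >>> 1 = m / 2 := by simp [Nat.shiftRight_eq_div_pow]
      rw [hhalf]
      have hle : m % 2 ≤ 1 := by omega
      have h4 : (1:Nat) ≤ 4 ^ bp := Nat.one_le_pow _ _ (by norm_num)
      have hm2 : (m % 2) * 4 ^ bp ≤ 4 ^ bp := by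
        calc (m % 2) * 4 ^ bp ≤ 1 * 4 ^ bp := Nat.mul_le_mul_right _ hle
          _ = 4 ^ bp := by ring
      have ihh := ih (m / 2) (by omega) (r + (m % 2) * 4 ^ bp) (bp + 1)
        (by rw [pow_succ]; omega)
      rw [ihh]
      congr 1
      rw [ilv_rec m, pow_succ]
      ring

theorem insert_zeros_eq (n : Int) : insert_zeros_in_gaps n = ((ilv n.toNat : Nat) : Int) := by
  by_cases h : 0 < n
  · have hn : n = ((n.toNat : Nat) : Int) := by omega
    have h2 := insertZerosLoop_eq n.toNat 0 0 (by norm_num)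
    simp only [Nat.cast_zero, pow_zero, one_mul, zero_add] at h2
    rw [insert_zeros_in_gaps, hn]
    exact h2
  · have h0 : n.toNat = 0 := by omega
    rw [insert_zeros_in_gaps, insertZerosLoop, if_neg (by omega), h0]
    rw [ilv]
    simp

theorem pairsStr_comb (x z : Nat) : pairsStr (2 * ilv x + ilv z) = bitsStr x z := by
  suffices H : ∀ (s x z : Nat), x + z ≤ s → pairsStr (2 * ilv x + ilv z) = bitsStr x z from
    H (x + z) x z le_rfl
  intro s
  induction s with
  | zero =>
    intro x z h
    have hx : x = 0 := by omega
    have hz : z = 0 := by omega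
    subst hx; subst hz
    rw [ilv]
    rw [bitsStr, pairsStr]
    simp
  | succ s ih =>
    intro x z hs
    by_cases h0 : x = 0 ∧ z = 0
    · obtain ⟨rfl, rfl⟩ := h0
      rw [ilv]
      rw [bitsStr, pairsStr]
      simp
    · have key : 2 * ilv x + ilv z = (2 * (x % 2) + z % 2) + 4 * (2 * ilv (x / 2) + ilv (z / 2)) := by
        rw [ilv_rec x, ilv_rec z]; ring
      have hP0 : 2 * ilv x + ilv z ≠ 0 := by
        intro hP
        have hx : ilv x = 0 := by omega
        have hz : ilv z = 0 := by omega
        exact h0 ⟨(ilv_eq_zero_iff x).mp hx, (ilv_eq_zero_iff z).mp hz⟩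
      rw [pairsStr, if_neg hP0]
      have hlt : 2 * (x % 2) + z % 2 < 4 := by omega
      have hmod : (2 * ilv x + ilv z) % 4 = 2 * (x % 2) + z % 2 := by omega
      have hdiv : (2 * ilv x + ilv z) / 4 = 2 * ilv (x / 2) + ilv (z / 2) := by omega
      rw [hmod, hdiv, ih (x / 2) (z / 2) (by omega)]
      rw [show bitsStr x z = bitsStr (x / 2) (z / 2) ++ [pch (2 * (x % 2) + z % 2)] from by
        rw [bitsStr, if_neg h0]]

theorem lenLoop_eq (m : Nat) : ∀ (l : Int),
    lenLoop (m : Int) l = l + ((PySem.Int.bitLength (m : Int) : Nat) : Int) := by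
  induction m using Nat.strong_induction_on with
  | _ m ih =>
    intro l
    rw [lenLoop]
    by_cases hm : m = 0
    · subst hm
      rw [if_neg (by norm_num)]
      simp [PySem.Int.bitLength_zero]
    · have hmpos : ((m:Int) > 0) := by exact_mod_cast Nat.pos_of_ne_zero hm
      rw [if_pos hmpos]
      have e1 : (m:Int) >>> (1:Nat) = ((m >>> 1 : Nat) : Int) := by simp
      have hhalf : m >>> 1 = m / 2 := by simp [Nat.shiftRight_eq_div_pow]
      rw [e1, hhalf, ih (m / 2) (by omega)]
      rw [PySem.Int.bitLength_natCast (Nat.pos_of_ne_zero hm)]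
      push_cast
      ring_nf

theorem pairs_len_le (m : Nat) : (pairsStr m).length ≤ PySem.Int.bitLength (m : Int) := by
  induction m using Nat.strong_induction_on with
  | _ m ih =>
    by_cases h0 : m = 0
    · subst h0
      rw [pairsStr]
      simp [PySem.Int.bitLength_zero]
    · rw [pairsStr, if_neg h0, List.length_append]
      simp only [List.length_cons, List.length_nil]
      have hblm : PySem.Int.bitLength (m:Int) = PySem.Int.bitLength ((m/2 : Nat):Int) + 1 :=
        PySem.Int.bitLength_natCast (Nat.pos_of_ne_zero h0)
      by_cases h2 : m / 2 = 0
      · have h4 : m / 4 = 0 := by omega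
        have h5 : (pairsStr (m / 4)).length = 0 := by rw [h4, pairsStr]; simp
        omega
      · have hbl2 : PySem.Int.bitLength ((m/2 : Nat):Int) = PySem.Int.bitLength ((m/4 : Nat):Int) + 1 := by
          have := PySem.Int.bitLength_natCast (m := m / 2) (Nat.pos_of_ne_zero h2)
          have hdd : m / 2 / 2 = m / 4 := by omega
          rwa [hdd] at this
        have := ih (m / 4) (by omega)
        omega

theorem fillLoop_eq (m : Nat) : ∀ (i : Nat) (pstr : List String), 1 ≤ i →
    i - 1 + (pairsStr m).length ≤ pstr.length →
    fillLoop (m : Int) i pstr =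
      pstr.take (pstr.length - (i - 1) - (pairsStr m).length) ++ pairsStr m
        ++ pstr.drop (pstr.length - (i - 1)) := by
  induction m using Nat.strong_induction_on with
  | _ m ih =>
    intro i pstr hi hlen
    rw [fillLoop]
    by_cases h0 : m = 0
    · subst h0
      rw [if_neg (by norm_num)]
      rw [pairsStr]
      simp [List.take_append_drop]
    · have hmpos : ((m:Int) > 0) := by exact_mod_cast Nat.pos_of_ne_zero h0
      rw [if_pos hmpos]
      have e2 : PySem.Int.band (m:Int) 3 = ((m % 4 : Nat) : Int) := by
        have h1 : m &&& 3 = m % 4 := by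
          have := Nat.and_two_pow_sub_one_eq_mod m 2
          norm_num at this
          exact this
        have := PySem.Int.band_natCast m 3
        rw [h1] at this
        exact_mod_cast this
      have e1 : (m:Int) >>> (2:Nat) = ((m / 4 : Nat) : Int) := by
        have h1 : m >>> 2 = m / 4 := by rw [Nat.shiftRight_eq_div_pow]
        rw [← h1]; simp
      rw [e2, e1]
      have hpairs : pairsStr m = pairsStr (m / 4) ++ [pch (m % 4)] := by
        rw [pairsStr, if_neg h0]
      have hpl : (pairsStr m).length = (pairsStr (m / 4)).length + 1 := by
        rw [hpairs]; simp
      have hiL : i ≤ pstr.length := by omega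
      have hsetlen : (pstr.set (pstr.length - i) (pch (m % 4))).length = pstr.length := by simp
      rw [show (PySem.List.pyGet? int_pchar ((m % 4 : Nat) : Int)).getD "" = pch (m % 4) from rfl]
      rw [ih (m / 4) (by omega) (i + 1) _ (by omega) (by rw [hsetlen]; omega)]
      rw [hsetlen]
      rw [List.take_set_of_le
        (show pstr.length - (i + 1 - 1) - (pairsStr (m / 4)).length ≤ pstr.length - i by omega)]
      have hdrop : (pstr.set (pstr.length - i) (pch (m % 4))).drop (pstr.length - (i + 1 - 1))
          = pch (m % 4) :: pstr.drop (pstr.length - (i - 1)) := by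
        rw [show pstr.length - (i + 1 - 1) = pstr.length - i from by omega]
        rw [List.drop_eq_getElem_cons (by rw [hsetlen]; omega)]
        rw [List.getElem_set_self (by rw [hsetlen]; omega)]
        rw [List.drop_set_of_lt (by omega)]
        rw [show pstr.length - i + 1 = pstr.length - (i - 1) from by omega]
      rw [hdrop]
      have hidx : pstr.length - (i - 1) - (pairsStr m).length
          = pstr.length - (i + 1 - 1) - (pairsStr (m / 4)).length := by omega
      rw [hidx, hpairs]
      simp [List.append_assoc]

theorem chars_join_flatten (ls : List (List Char)) : PySem.Chars.join [] ls = ls.flatten := by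
  show List.intercalate [] ls = ls.flatten
  induction ls with
  | nil => rfl
  | cons a t ih => cases t <;> simp_all [List.intercalate]

theorem join_flatten (l : List String) :
    PySem.Str.join "" l = String.ofList (List.map String.toList l).flatten := by
  show String.ofList (PySem.Chars.join "".toList (l.map String.toList)) = _
  rw [show "".toList = ([] : List Char) from rfl, chars_join_flatten]

theorem join_replicate_empty (a : Nat) (l : List String) :
    PySem.Str.join "" (List.replicate a "" ++ l) = PySem.Str.join "" l := by
  rw [join_flatten, join_flatten]
  congr 1
  rw [List.map_append, List.flatten_append]
  have h1 : (List.replicate a "").map String.toList = List.replicate a ([] : List Char) := by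
    simp [show String.toList "" = [] from rfl]
  rw [h1]
  have h0 : (List.replicate a ([] : List Char)).flatten = [] := by
    induction a with
    | zero => rfl
    | succ n ihn => simp [List.replicate_succ, ihn]
  rw [h0, List.nil_append]

theorem bitLength_eq_zero_iff (m : Nat) : PySem.Int.bitLength (m : Int) = 0 ↔ m = 0 := by
  constructor
  · intro h
    by_contra hm
    rw [PySem.Int.bitLength_natCast (Nat.pos_of_ne_zero hm)] at h
    omega
  · intro h; subst h; exact_mod_cast PySem.Int.bitLength_zero

theorem bits_map_eq (n : Nat) : ∀ (x z : Nat),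
    max (PySem.Int.bitLength (x : Int)) (PySem.Int.bitLength (z : Int)) = n →
    (List.range n).map (fun k => pch (2 * (x >>> (n - 1 - k) &&& 1) + (z >>> (n - 1 - k) &&& 1)))
      = bitsStr x z := by
  induction n with
  | zero =>
    intro x z h
    have h0 := Nat.max_eq_zero_iff.mp h
    have hx := (bitLength_eq_zero_iff x).mp h0.1
    have hz := (bitLength_eq_zero_iff z).mp h0.2
    subst hx; subst hz
    rw [bitsStr]
    simp
  | succ n ih =>
    intro x z h
    have hnb : ¬(x = 0 ∧ z = 0) := by
      rintro ⟨rfl, rfl⟩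
      rw [show ((0:Nat):Int) = (0:Int) from rfl, PySem.Int.bitLength_zero] at h
      omega
    rw [List.range_succ, List.map_append]
    have hlast : List.map
        (fun k => pch (2 * (x >>> (n + 1 - 1 - k) &&& 1) + (z >>> (n + 1 - 1 - k) &&& 1))) [n]
        = [pch (2 * (x % 2) + z % 2)] := by
      simp only [List.map_cons, List.map_nil]
      rw [show n + 1 - 1 - n = 0 from by omega]
      rw [Nat.shiftRight_zero, Nat.shiftRight_zero, Nat.and_one_is_mod, Nat.and_one_is_mod]
    have hmain : List.map
        (fun k => pch (2 * (x >>> (n + 1 - 1 - k) &&& 1) + (z >>> (n + 1 - 1 - k) &&& 1)))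
        (List.range n)
        = List.map
        (fun k => pch (2 * ((x / 2) >>> (n - 1 - k) &&& 1) + ((z / 2) >>> (n - 1 - k) &&& 1)))
        (List.range n) := by
      apply List.map_congr_left
      intro k hk
      have hk' : k < n := List.mem_range.mp hk
      have e : n + 1 - 1 - k = 1 + (n - 1 - k) := by omega
      have hx2 : x >>> 1 = x / 2 := by simp [Nat.shiftRight_eq_div_pow]
      have hz2 : z >>> 1 = z / 2 := by simp [Nat.shiftRight_eq_div_pow]
      rw [e, Nat.shiftRight_add, Nat.shiftRight_add, hx2, hz2]
    have hm : max (PySem.Int.bitLength ((x / 2 : Nat) : Int)) (PySem.Int.bitLength ((z / 2 : Nat) : Int)) = n := by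
      by_cases hx0 : x = 0 <;> by_cases hz0 : z = 0
      · exact absurd ⟨hx0, hz0⟩ hnb
      · subst hx0
        have e0 : PySem.Int.bitLength (((0:Nat) / 2 : Nat) : Int) = 0 := by
          norm_num [PySem.Int.bitLength_zero]
        have hzb := PySem.Int.bitLength_natCast (m := z) (Nat.pos_of_ne_zero hz0)
        rw [show ((0:Nat):Int) = (0:Int) from rfl, PySem.Int.bitLength_zero] at h
        rw [e0]
        omega
      · subst hz0
        have e0 : PySem.Int.bitLength (((0:Nat) / 2 : Nat) : Int) = 0 := by
          norm_num [PySem.Int.bitLength_zero]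
        have hxb := PySem.Int.bitLength_natCast (m := x) (Nat.pos_of_ne_zero hx0)
        rw [show ((0:Nat):Int) = (0:Int) from rfl, PySem.Int.bitLength_zero] at h
        rw [e0]
        omega
      · have hxb := PySem.Int.bitLength_natCast (m := x) (Nat.pos_of_ne_zero hx0)
        have hzb := PySem.Int.bitLength_natCast (m := z) (Nat.pos_of_ne_zero hz0)
        omega
    rw [hlast, hmain, ih (x / 2) (z / 2) hm]
    rw [show bitsStr x z = bitsStr (x / 2) (z / 2) ++ [pch (2 * (x % 2) + z % 2)] from by
      rw [bitsStr, if_neg hnb]]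

theorem portA_eq (x_int z_int : Int) :
    pstr_from_xz x_int z_int = PySem.Str.join "" (bitsStr x_int.toNat z_int.toNat) := by
  simp only [pstr_from_xz]
  rw [insert_zeros_eq x_int, insert_zeros_eq z_int]
  have hP : ((ilv x_int.toNat : Nat) : Int) <<< (1:Nat) + ((ilv z_int.toNat : Nat) : Int)
      = ((2 * ilv x_int.toNat + ilv z_int.toNat : Nat) : Int) := by
    have h1 : ((ilv x_int.toNat : Nat) : Int) <<< (1:Nat) = ((ilv x_int.toNat <<< 1 : Nat) : Int) := by
      simp
    rw [h1, Nat.shiftLeft_eq]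
    push_cast
    ring
  rw [hP]
  set P := 2 * ilv x_int.toNat + ilv z_int.toNat with hPdef
  rw [lenLoop_eq P 0]
  set B := PySem.Int.bitLength (P : Int) with hB
  have hband : PySem.Int.band ((0:Int) + ((B : Nat) : Int)) 1 = ((B % 2 : Nat) : Int) := by
    rw [zero_add]
    have := PySem.Int.band_natCast B 1
    rw [Nat.and_one_is_mod] at this
    exact_mod_cast this
  rw [hband, zero_add]
  have hsum : ((B : Nat) : Int) + ((B % 2 : Nat) : Int) = ((B + B % 2 : Nat) : Int) := by
    push_cast; ring
  rw [hsum, PySem.List.pyRepeat_singleton]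
  rw [show ((B + B % 2 : Nat) : Int).toNat = B + B % 2 from by omega]
  set L := B + B % 2 with hLdef
  have hnp : (pairsStr P).length ≤ B := pairs_len_le P
  rw [fillLoop_eq P 1 _ le_rfl (by simp only [List.length_replicate]; omega)]
  simp only [List.length_replicate, List.drop_replicate, List.take_replicate]
  rw [show L - (L - (1 - 1)) = 0 from by omega]
  rw [List.replicate_zero, List.append_nil]
  rw [join_replicate_empty]
  rw [pairsStr_comb]

theorem portB_eq (x_int z_int : Int) :
    pstr_from_xz_alt x_int z_int = PySem.Str.join "" (bitsStr x_int.toNat z_int.toNat) := by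
  have hx : max x_int 0 = ((x_int.toNat : Nat) : Int) := (Int.toNat_eq_max x_int).symm
  have hz : max z_int 0 = ((z_int.toNat : Nat) : Int) := (Int.toNat_eq_max z_int).symm
  simp only [pstr_from_xz_alt, hx, hz]
  set xt := x_int.toNat with hxt
  set zt := z_int.toNat with hzt
  set n := max (PySem.Int.bitLength (xt : Int)) (PySem.Int.bitLength (zt : Int)) with hn
  congr 1
  rw [PySem.List.pyRange_neg_one]
  rw [show ((n : Int) - 1 - -1).toNat = n from by omega]
  rw [List.map_map]
  rw [← bits_map_eq n xt zt hn.symm]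
  apply List.map_congr_left
  intro k hk
  have hk' : k < n := List.mem_range.mp hk
  simp only [Function.comp]
  rw [show ((n : Int) - 1 - (k : Int)).toNat = n - 1 - k from by omega]
  have ex : ((xt : Int)) >>> (((n - 1 - k : Nat)) : Int) = ((xt >>> (n - 1 - k) : Nat) : Int) := by
    simp
  have ez : ((zt : Int)) >>> (((n - 1 - k : Nat)) : Int) = ((zt >>> (n - 1 - k) : Nat) : Int) := by
    simp
  rw [ex, ez]
  have bx : PySem.Int.band ((xt >>> (n - 1 - k) : Nat) : Int) 1
      = ((xt >>> (n - 1 - k) &&& 1 : Nat) : Int) := by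
    exact_mod_cast PySem.Int.band_natCast _ 1
  have bz : PySem.Int.band ((zt >>> (n - 1 - k) : Nat) : Int) 1
      = ((zt >>> (n - 1 - k) &&& 1 : Nat) : Int) := by
    exact_mod_cast PySem.Int.band_natCast _ 1
  rw [bx, bz]
  simp only [pch]
  congr 2
  push_cast
  ring

-- ===== VERDICT (by name: the statement is the Claim_ definition above) =====
theorem pstr_from_xz_spec : Claim_equal_pstr_from_xz := by
  intro x_int z_int _
  show pstr_from_xz x_int z_int = pstr_from_xz_alt x_int z_int
  rw [portA_eq, portB_eq]
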